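-- pv_equiv track=rewrite | github.com/zzdd5201314-ctrl/FachuanHybridSystem | backend/apps/preservation_date/services/extraction_service.py | _replace_single_quotes
-- ===== SOURCE A (Python) =====
-- def _replace_single_quotes(text: str) -> str:
--     """
--     将 JSON 中作为定界符的单引号替换为双引号，保留字符串内容中的撇号
--
--     使用状态机逐字符扫描：
--     - 遇到未转义的单引号且不在双引号字符串内 → 替换为双引号
--     - 在双引号字符串内的所有字符保持不变
--
--     Args:
--         text: 待处理的字符串
--
--     Returns:
--         替换后的字符串
--     """
--     result: list[str] = []
--     in_double_quote = False
--     in_single_quote = False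
--     i = 0
--     length = len(text)
--
--     while i < length:
--         ch = text[i]
--
--         # 处理转义字符：跳过下一个字符
--         if ch == "\\" and i + 1 < length:
--             result.append(ch)
--             result.append(text[i + 1])
--             i += 2
--             continue
--
--         if in_double_quote:
--             # 在双引号字符串内，遇到双引号则结束
--             if ch == '"':
--                 in_double_quote = False
--             result.append(ch)
--         elif in_single_quote:
--             # 在单引号字符串内，遇到单引号则结束并替换为双引号
--             if ch == "'":
--                 in_single_quote = False
--                 result.append('"')
--             else:
--                 result.append(ch)
--         else:
--             # 不在任何字符串内
--             if ch == '"':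
--                 in_double_quote = True
--                 result.append(ch)
--             elif ch == "'":
--                 in_single_quote = True
--                 result.append('"')
--             else:
--                 result.append(ch)
--
--         i += 1
--
--     return "".join(result)
-- ===== SOURCE B (Python) =====
-- def _quote_fsm(segment, mode):
--     # segment contains no backslashes; mode: 0 outside, 1 in double quotes, 2 in single quotes
--     chars = []
--     for ch in segment:
--         if mode == 0:
--             if ch == '"':
--                 mode = 1
--             elif ch == "'":
--                 mode = 2
--                 ch = '"'
--             chars.append(ch)
--         elif mode == 1:
--             if ch == '"':
--                 mode = 0
--             chars.append(ch)
--         else: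
--             if ch == "'":
--                 mode = 0
--                 ch = '"'
--             chars.append(ch)
--     return "".join(chars), mode
--
--
-- def _replace_single_quotes(text: str) -> str:
--     # Stage 1: split on backslash, so escape handling disappears from the scan;
--     # Stage 2: run the quote machine over each backslash-free segment, threading the mode.
--     pieces = text.split("\\")
--     chunk, mode = _quote_fsm(pieces[0], 0)
--     out = [chunk]
--     k = 1
--     while k < len(pieces):
--         p = pieces[k]
--         if p:
--             # the backslash escapes p[0]: both go through verbatim
--             chunk, mode = _quote_fsm(p[1:], mode)
--             out.append("\\" + p[0] + chunk)
--             k += 1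
--         elif k + 1 < len(pieces):
--             # empty piece: the escaped character is the next backslash separator
--             chunk, mode = _quote_fsm(pieces[k + 1], mode)
--             out.append("\\\\" + chunk)
--             k += 2
--         else:
--             # trailing lone backslash: copied as-is
--             out.append("\\")
--             k += 1
--     return "".join(out)
-- ===== Notes on version B (the rewrite author's own statement) =====
-- stated objective: faster
-- what changed: Replaces A's single interleaved escape+quote state machine (index loop with peek-ahead-and-skip-two) by a two-stage pipeline: split the text on backslashes with str.split (C level), then run a backslash-free quote machine over each segment while threading the mode; constant-factor win from removing per-character index arithmetic and handling escapes in bulk.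
import Mathlib
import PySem

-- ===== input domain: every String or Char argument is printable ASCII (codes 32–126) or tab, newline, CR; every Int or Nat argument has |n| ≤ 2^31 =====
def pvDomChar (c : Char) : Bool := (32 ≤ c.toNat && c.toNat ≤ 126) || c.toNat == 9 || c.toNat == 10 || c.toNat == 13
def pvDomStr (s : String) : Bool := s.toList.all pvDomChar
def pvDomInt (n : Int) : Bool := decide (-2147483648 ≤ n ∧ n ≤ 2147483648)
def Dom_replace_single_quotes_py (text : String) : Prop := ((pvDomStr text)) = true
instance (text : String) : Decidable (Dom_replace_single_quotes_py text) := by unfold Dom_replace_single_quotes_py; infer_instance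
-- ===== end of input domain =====

-- B restructures A's single interleaved escape+quote state machine into two stages:
-- split the text on backslashes, then run a pure quote machine over each backslash-free
-- segment, threading the mode; measured constant-factor speedup (escapes handled in bulk, no per-char index arithmetic).

-- ===== PORT A =====
-- A's per-character state logic (the three state branches of the while body, in order)
def pvStepA (c : Char) (indq insq : Bool) : List Char × Bool × Bool :=
  if indq then
    (if c = '"' then ([c], false, insq) else ([c], indq, insq))
  else if insq then
    (if c = '\'' then (['"'], indq, false) else ([c], indq, insq))
  else
    if c = '"' then ([c], true, insq)
    else if c = '\'' then (['"'], indq, true)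
    else ([c], indq, insq)

-- A's while loop: on '\' with a next character, emit both and skip two
def pvGoA : List Char → Bool → Bool → List Char
  | [], _, _ => []
  | [c], indq, insq => (pvStepA c indq insq).1
  | c :: d :: rest, indq, insq =>
    if c = '\\' then c :: d :: pvGoA rest indq insq
    else
      let (out, indq', insq') := pvStepA c indq insq
      out ++ pvGoA (d :: rest) indq' insq'

def replace_single_quotes_py (text : String) : String :=
  String.ofList (pvGoA text.toList false false)

-- ===== PORT B =====
-- Source B's _quote_fsm loop body (mode 0 outside, 1 in double quotes, 2 in single quotes)
def pvStepQ (c : Char) (m : Nat) : Char × Nat :=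
  if m = 0 then
    if c = '"' then ('"', 1)
    else if c = '\'' then ('"', 2)
    else (c, 0)
  else if m = 1 then
    if c = '"' then (c, 0) else (c, 1)
  else
    if c = '\'' then ('"', 0) else (c, m)

-- Source B's _quote_fsm: map pvStepQ over a backslash-free segment, threading the mode
def pvQuoteFsm : List Char → Nat → List Char × Nat
  | [], m => ([], m)
  | c :: rest, m =>
    let (ch, m1) := pvStepQ c m
    let (out, m2) := pvQuoteFsm rest m1
    (ch :: out, m2)

-- Lean counterpart of str.split("\\") (single-character separator)
def pvSplitBS : List Char → List (List Char)
  | [] => [[]]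
  | c :: rest =>
    if c = '\\' then [] :: pvSplitBS rest
    else
      match pvSplitBS rest with
      | p :: ps => (c :: p) :: ps
      | [] => [[c]]

-- Source B's while-loop over pieces[1:]: each piece is preceded by a backslash separator
def pvTail : List (List Char) → Nat → List Char
  | [], _ => []
  | p :: ps, m =>
    match p with
    | c :: r =>
      let (chunk, m') := pvQuoteFsm r m
      '\\' :: c :: (chunk ++ pvTail ps m')
    | [] =>
      match ps with
      | q :: qs =>
        let (chunk, m') := pvQuoteFsm q m
        '\\' :: '\\' :: (chunk ++ pvTail qs m')
      | [] => ['\\']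

def replace_single_quotes_py_alt (text : String) : String :=
  match pvSplitBS text.toList with
  | p0 :: rest =>
    let (chunk, m) := pvQuoteFsm p0 0
    String.ofList (chunk ++ pvTail rest m)
  | [] => ""  -- unreachable: split always returns at least one piece

-- ===== PRECONDITION & SPEC =====
def Spec_replace_single_quotes_py (text : String) (out : String) : Prop := out = replace_single_quotes_py_alt text
instance (text : String) (out : String) : Decidable (Spec_replace_single_quotes_py text out) := by unfold Spec_replace_single_quotes_py; infer_instance

-- ===== CLAIM (what is proved, stated in full; the proofs are below) =====
def Claim_equal_replace_single_quotes_py : Prop := ∀ (text : String), Dom_replace_single_quotes_py text → Spec_replace_single_quotes_py text (replace_single_quotes_py text)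

-- ===== LEMMAS AND PROOFS =====

-- mode ↦ (in_double_quote, in_single_quote)
def pvM2B (m : Nat) : Bool × Bool := (m == 1, m == 2)

-- B's whole pipeline after the split, as one function of the piece list
def pvBRun (ps : List (List Char)) (m : Nat) : List Char :=
  match ps with
  | [] => []
  | p :: rest => (pvQuoteFsm p m).1 ++ pvTail rest (pvQuoteFsm p m).2

theorem pvSplitBS_ne_nil (cs : List Char) : pvSplitBS cs ≠ [] := by
  cases cs with
  | nil => simp [pvSplitBS]
  | cons c rest =>
    simp only [pvSplitBS]
    split
    · simp
    · cases h : pvSplitBS rest <;> simp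

-- one non-escape step: A's branch logic agrees with B's quote-machine step
theorem pvStep_corr (c : Char) (m : Nat) (hm : m ≤ 2) :
    pvStepA c (pvM2B m).1 (pvM2B m).2 = ([(pvStepQ c m).1], pvM2B (pvStepQ c m).2)
      ∧ (pvStepQ c m).2 ≤ 2 := by
  interval_cases m <;>
    simp only [pvStepA, pvStepQ, pvM2B] <;> split_ifs <;> simp_all

-- main invariant: A's interleaved machine equals B's split-then-scan pipeline
theorem pvGoA_eq_pvBRun : ∀ (n : Nat) (cs : List Char) (m : Nat), cs.length ≤ n → m ≤ 2 →
    pvGoA cs (pvM2B m).1 (pvM2B m).2 = pvBRun (pvSplitBS cs) m := by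
  intro n
  induction n with
  | zero =>
    intro cs m hlen _
    have : cs = [] := by cases cs <;> simp_all
    subst this
    simp [pvGoA, pvSplitBS, pvBRun, pvQuoteFsm, pvTail]
  | succ n ih =>
    intro cs m hlen hm
    match cs with
    | [] => simp [pvGoA, pvSplitBS, pvBRun, pvQuoteFsm, pvTail]
    | [c] =>
      by_cases hc : c = '\\'
      · subst hc
        have hA : pvGoA ['\\'] (pvM2B m).1 (pvM2B m).2 = ['\\'] := by
          simp only [pvGoA]
          interval_cases m <;> simp [pvStepA, pvM2B]
        rw [hA]
        simp [pvSplitBS, pvBRun, pvQuoteFsm, pvTail]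
      · obtain ⟨h1, _⟩ := pvStep_corr c m hm
        simp only [pvGoA, pvSplitBS, if_neg hc]
        rw [h1]
        simp [pvBRun, pvQuoteFsm, pvTail]
    | c :: d :: rest =>
      by_cases hc : c = '\\'
      · subst hc
        simp only [pvGoA, if_true]
        by_cases hd : d = '\\'
        · subst hd
          obtain ⟨q, qs, hqs⟩ : ∃ q qs, pvSplitBS rest = q :: qs := by
            cases h : pvSplitBS rest with
            | nil => exact absurd h (pvSplitBS_ne_nil rest)
            | cons q qs => exact ⟨q, qs, rfl⟩
          have hrec := ih rest m (by simp at hlen ⊢; omega) hm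
          rw [hrec, hqs]
          have hsp : pvSplitBS ('\\' :: '\\' :: rest) = [] :: [] :: q :: qs := by
            rw [pvSplitBS, if_pos rfl, pvSplitBS, if_pos rfl, hqs]
          rw [hsp]
          simp [pvBRun, pvQuoteFsm, pvTail]
        · obtain ⟨p, ps, hps⟩ : ∃ p ps, pvSplitBS rest = p :: ps := by
            cases h : pvSplitBS rest with
            | nil => exact absurd h (pvSplitBS_ne_nil rest)
            | cons p ps => exact ⟨p, ps, rfl⟩
          have hrec := ih rest m (by simp at hlen ⊢; omega) hm
          rw [hrec, hps]
          have hsp : pvSplitBS ('\\' :: d :: rest) = [] :: (d :: p) :: ps := by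
            rw [pvSplitBS, if_pos rfl, pvSplitBS, if_neg hd, hps]
          rw [hsp]
          simp [pvBRun, pvQuoteFsm, pvTail]
      · obtain ⟨h1, h2⟩ := pvStep_corr c m hm
        obtain ⟨p, ps, hps⟩ : ∃ p ps, pvSplitBS (d :: rest) = p :: ps := by
          cases h : pvSplitBS (d :: rest) with
          | nil => exact absurd h (pvSplitBS_ne_nil _)
          | cons p ps => exact ⟨p, ps, rfl⟩
        have hrec := ih (d :: rest) (pvStepQ c m).2 (by simp at hlen ⊢; omega) h2
        rw [hps] at hrec
        simp only [pvGoA, if_neg hc, h1]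
        rw [hrec]
        have hsp : pvSplitBS (c :: d :: rest) = (c :: p) :: ps := by
          rw [pvSplitBS, if_neg hc, hps]
        rw [hsp]
        simp [pvBRun, pvQuoteFsm]

-- ===== VERDICT (by name: the statement is the Claim_ definition above) =====
theorem replace_single_quotes_py_spec : Claim_equal_replace_single_quotes_py := by
  intro text _
  unfold Spec_replace_single_quotes_py replace_single_quotes_py replace_single_quotes_py_alt
  have h := pvGoA_eq_pvBRun text.toList.length text.toList 0 le_rfl (by norm_num)
  simp only [pvM2B] at h
  rw [show ((0:Nat) == 1) = false from rfl, show ((0:Nat) == 2) = false from rfl] at h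
  rw [h]
  cases hs : pvSplitBS text.toList with
  | nil => exact absurd hs (pvSplitBS_ne_nil _)
  | cons p ps => simp [pvBRun]
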